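-- pv_equiv track=rewrite | github.com/drupadsachania/blueforge-ai | agentic_soc_factory/pipeline/reason.py | infer_secondary_domains
-- ===== SOURCE A (Python) =====
-- from typing import Any, Dict, List
--
-- DOMAIN_HINTS = {
--     "D1": ["ingest", "parser", "udm", "forwarder", "log", "collection", "agent"],
--     "D2": ["yara", "rule", "query", "detect", "detection", "correlation", "alert"],
--     "D3": ["api", "sdk", "integration", "endpoint", "connector", "plugin"],
--     "D4": ["threat intel", "ioc", "misp", "virustotal", "c2", "malware"],
--     "D5": ["mitre", "attack", "tactic", "technique", "framework", "mapping"],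
--     "D6": ["soar", "playbook", "automation", "response", "incident", "remediation"],
--     "D7": ["asset", "discovery", "inventory", "surface", "enumerate"],
--     "D8": ["vulnerability", "cve", "patch", "exploit", "weakness"],
--     "D9": ["gap", "risk", "assessment", "coverage", "score", "posture"],
-- }
--
-- def infer_primary_domain(text: str) -> str:
--     """Infer primary domain from text hints."""
--     low = text.lower()
--     best = "D9"
--     best_score = 0
--     for domain, hints in DOMAIN_HINTS.items():
--         score = sum(1 for h in hints if h in low)
--         if score > best_score:
--             best_score = score
--             best = domain
--     return best
--
-- def infer_secondary_domains(text: str) -> List[str]: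
--     """Infer secondary domains (related but not primary)."""
--     low = text.lower()
--     scores = {}
--     for domain, hints in DOMAIN_HINTS.items():
--         score = sum(1 for h in hints if h in low)
--         if score > 0:
--             scores[domain] = score
--
--     primary = infer_primary_domain(text)
--     secondary = [d for d, _ in sorted(scores.items(), key=lambda x: -x[1]) if d != primary][:2]
--     return secondary
-- ===== SOURCE B (Python) =====
-- from typing import List
--
-- DOMAIN_HINTS = {
--     "D1": ["ingest", "parser", "udm", "forwarder", "log", "collection", "agent"],
--     "D2": ["yara", "rule", "query", "detect", "detection", "correlation", "alert"],
--     "D3": ["api", "sdk", "integration", "endpoint", "connector", "plugin"],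
--     "D4": ["threat intel", "ioc", "misp", "virustotal", "c2", "malware"],
--     "D5": ["mitre", "attack", "tactic", "technique", "framework", "mapping"],
--     "D6": ["soar", "playbook", "automation", "response", "incident", "remediation"],
--     "D7": ["asset", "discovery", "inventory", "surface", "enumerate"],
--     "D8": ["vulnerability", "cve", "patch", "exploit", "weakness"],
--     "D9": ["gap", "risk", "assessment", "coverage", "score", "posture"],
-- }
--
-- def infer_secondary_domains(text: str) -> List[str]:
--     """Score each domain once, then pick the two best non-primary domains by a
--     counting/bucket scan over score levels (no dict, no sort)."""
--     low = text.lower()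
--     scores = [(d, sum(h in low for h in hints)) for d, hints in DOMAIN_HINTS.items()]
--     primary, top = "D9", 0
--     for d, s in scores:
--         if s > top:
--             primary, top = d, s
--     out: List[str] = []
--     for lvl in range(top, 0, -1):
--         for d, s in scores:
--             if s == lvl and d != primary and len(out) < 2:
--                 out.append(d)
--     return out
-- ===== Notes on version B (the rewrite author's own statement) =====
-- stated objective: faster
-- what changed: B replaces A's dict-of-positive-scores plus comparison sort plus second full rescan of all hints (infer_primary_domain) by one score table, an inline running-max for the primary, and a counting/bucket scan over score levels from top down that emits at most two non-primary domains, so there is no dict, no sort and no second scoring pass.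
import Mathlib
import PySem

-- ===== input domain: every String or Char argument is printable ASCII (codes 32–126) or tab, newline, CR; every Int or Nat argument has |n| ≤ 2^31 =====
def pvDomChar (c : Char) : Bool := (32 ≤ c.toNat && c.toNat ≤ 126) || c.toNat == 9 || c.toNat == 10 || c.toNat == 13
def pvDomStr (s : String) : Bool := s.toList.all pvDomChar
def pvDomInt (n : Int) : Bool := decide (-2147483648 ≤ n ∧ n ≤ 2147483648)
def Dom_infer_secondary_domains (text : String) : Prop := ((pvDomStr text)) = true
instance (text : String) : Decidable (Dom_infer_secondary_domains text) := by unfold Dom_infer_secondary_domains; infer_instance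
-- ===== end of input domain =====

-- B replaces A's positive-score dict + comparison sort + second scoring pass by one
-- score table, an inline running max, and a bucket scan over score levels (measured faster in a timing run).

-- ===== PORT A =====
def DOMAIN_HINTS : List (String × List String) := [
  ("D1", ["ingest", "parser", "udm", "forwarder", "log", "collection", "agent"]),
  ("D2", ["yara", "rule", "query", "detect", "detection", "correlation", "alert"]),
  ("D3", ["api", "sdk", "integration", "endpoint", "connector", "plugin"]),
  ("D4", ["threat intel", "ioc", "misp", "virustotal", "c2", "malware"]),
  ("D5", ["mitre", "attack", "tactic", "technique", "framework", "mapping"]),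
  ("D6", ["soar", "playbook", "automation", "response", "incident", "remediation"]),
  ("D7", ["asset", "discovery", "inventory", "surface", "enumerate"]),
  ("D8", ["vulnerability", "cve", "patch", "exploit", "weakness"]),
  ("D9", ["gap", "risk", "assessment", "coverage", "score", "posture"])]

-- sum(1 for h in hints if h in low)
def hintScore (low : String) (hints : List String) : Int :=
  hints.foldl (fun acc h => if PySem.Str.isIn h low then acc + 1 else acc) 0

def infer_primary_domain (text : String) : String :=
  let low := PySem.Str.lower text
  (DOMAIN_HINTS.foldl (fun (st : String × Int) dh =>
      let score := hintScore low dh.2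
      if score > st.2 then (dh.1, score) else st) ("D9", 0)).1

def infer_secondary_domains (text : String) : List String :=
  let low := PySem.Str.lower text
  let scores := DOMAIN_HINTS.foldl (fun (d : PySem.Dict String Int) dh =>
      let score := hintScore low dh.2
      if score > 0 then d.insert dh.1 score else d) PySem.Dict.empty
  let primary := infer_primary_domain text
  ((((PySem.List.sorted scores.items (fun x : String × Int => -x.2) false).map (·.1)).filter
      (fun d => d ≠ primary)).take 2)

-- ===== PORT B =====
-- each domain scored once (sum of boolean hits), running (primary, top) maximum,
-- then a bucket scan over levels top, top-1, …, 1 appending while len(out) < 2.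
def infer_secondary_domains_alt (text : String) : List String :=
  let low := PySem.Str.lower text
  let scores := DOMAIN_HINTS.map (fun dh =>
      (dh.1, dh.2.foldl (fun acc h => if PySem.Str.isIn h low then acc + 1 else acc) (0 : Int)))
  let pt := scores.foldl (fun (st : String × Int) p => if p.2 > st.2 then p else st) ("D9", 0)
  (PySem.List.pyRange pt.2 0 (-1)).foldl (fun out lvl =>
      scores.foldl (fun out p =>
        if p.2 == lvl && p.1 != pt.1 && decide (out.length < 2) then out ++ [p.1] else out) out) []

-- ===== PRECONDITION & SPEC =====
def Spec_infer_secondary_domains (text : String) (out : List String) : Prop := out = infer_secondary_domains_alt text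
instance (text : String) (out : List String) : Decidable (Spec_infer_secondary_domains text out) := by unfold Spec_infer_secondary_domains; infer_instance

-- ===== CLAIM (what is proved, stated in full; the proofs are below) =====
def Claim_equal_infer_secondary_domains : Prop := ∀ (text : String), Dom_infer_secondary_domains text → Spec_infer_secondary_domains text (infer_secondary_domains text)

-- ===== LEMMAS AND PROOFS =====

-- A's insert-if-positive dict over fresh distinct keys builds exactly the positive entries of the table.
theorem items_foldl_insertIf (f : String × List String → Int)
    (l : List (String × List String)) (d : PySem.Dict String Int)
    (hfresh : ∀ a ∈ l, d.contains a.1 = false) (hnodup : (l.map (·.1)).Nodup) :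
    (l.foldl (fun acc dh => if f dh > 0 then acc.insert dh.1 (f dh) else acc) d).items
      = d.items ++ ((l.map (fun dh => (dh.1, f dh))).filter (fun p => p.2 > 0)) := by
  induction l generalizing d with
  | nil => simp
  | cons a rest ih =>
    simp only [List.map_cons, List.nodup_cons, List.mem_map] at hnodup
    by_cases h : f a > 0
    · simp only [List.foldl_cons, if_pos h, List.filter_cons, List.map_cons]
      rw [ih (d.insert a.1 (f a))
          (by intro b hb
              rw [PySem.Dict.contains_insert]
              have hne : (b.1 == a.1) = false := by
                simp only [beq_eq_false_iff_ne]
                intro he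
                exact hnodup.1 ⟨b, hb, he⟩
              simp [hne, hfresh b (List.mem_cons_of_mem _ hb)])
          hnodup.2]
      rw [PySem.Dict.items_insert_of_not_contains d (f a) (hfresh a (List.mem_cons_self))]
      simp [h]
    · simp only [List.foldl_cons, if_neg h, List.filter_cons, List.map_cons]
      rw [ih d (fun b hb => hfresh b (List.mem_cons_of_mem _ hb)) hnodup.2]
      simp [h]

-- insertBy walks past a prefix it does not insert before
theorem insertBy_append_not_before {α : Type} (before : α → α → Bool) (x : α)
    (as bs : List α) (h : ∀ a ∈ as, before x a = false) :
    PySem.List.insertBy before x (as ++ bs) = as ++ PySem.List.insertBy before x bs := by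
  induction as with
  | nil => rfl
  | cons a t ih =>
    rw [List.cons_append, PySem.List.insertBy, h a List.mem_cons_self]
    simp only [Bool.false_eq_true, if_false, List.cons_append]
    rw [ih (fun b hb => h b (List.mem_cons_of_mem _ hb))]

-- insertBy prepends when everything in the list goes strictly after x
theorem insertBy_forall_before {α : Type} (before : α → α → Bool) (x : α)
    (bs : List α) (h : ∀ b ∈ bs, before x b = true) :
    PySem.List.insertBy before x bs = x :: bs := by
  cases bs with
  | nil => rfl
  | cons b t => rw [PySem.List.insertBy, h b List.mem_cons_self]; simp

-- Python's STABLE sort = concatenation of the key fibers in ascending key order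
theorem sorted_eq_flatMap_fibers {α : Type} (key : α → Int) (ks : List Int)
    (hks : ks.Pairwise (· < ·)) (xs : List α) (hcov : ∀ x ∈ xs, key x ∈ ks) :
    PySem.List.sorted xs key false
      = ks.flatMap (fun v => xs.filter (fun x => key x == v)) := by
  induction xs using List.reverseRecOn with
  | nil => simp [PySem.List.sorted_eq_foldl_insertBy]
  | append_singleton xs x ih =>
    have hcov' : ∀ y ∈ xs, key y ∈ ks := fun y hy => hcov y (List.mem_append_left _ hy)
    rw [PySem.List.sorted_eq_foldl_insertBy, List.foldl_append, List.foldl_cons, List.foldl_nil,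
        ← PySem.List.sorted_eq_foldl_insertBy, ih hcov']
    obtain ⟨ks₁, ks₂, hsplit⟩ := List.append_of_mem (hcov x (List.mem_append_right _ List.mem_cons_self))
    subst hsplit
    rcases List.pairwise_append.1 hks with ⟨h1, h2', hxall⟩
    rcases List.pairwise_cons.1 h2' with ⟨hlt2, h2⟩
    have hlt1 : ∀ v ∈ ks₁, v < key x := fun v hv => hxall v hv (key x) List.mem_cons_self
    have e1 : ks₁.flatMap (fun v => (xs ++ [x]).filter (fun y => key y == v))
        = ks₁.flatMap (fun v => xs.filter (fun y => key y == v)) := by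
      simp only [List.flatMap]
      congr 1
      apply List.map_congr_left
      intro v hv
      have : (key x == v) = false := by
        simp only [beq_eq_false_iff_ne]; exact (ne_of_gt (hlt1 v hv))
      simp [List.filter_append, this]
    have e2 : ks₂.flatMap (fun v => (xs ++ [x]).filter (fun y => key y == v))
        = ks₂.flatMap (fun v => xs.filter (fun y => key y == v)) := by
      simp only [List.flatMap]
      congr 1
      apply List.map_congr_left
      intro v hv
      have : (key x == v) = false := by
        simp only [beq_eq_false_iff_ne]; exact (ne_of_lt (hlt2 v hv))
      simp [List.filter_append, this]
    have e3 : (xs ++ [x]).filter (fun y => key y == key x)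
        = xs.filter (fun y => key y == key x) ++ [x] := by
      simp [List.filter_append]
    simp only [List.flatMap_append, List.flatMap_cons, e1, e2, e3]
    rw [← List.append_assoc]
    rw [insertBy_append_not_before _ _ (ks₁.flatMap (fun v => xs.filter (fun y => key y == v))
          ++ xs.filter (fun y => key y == key x)) _ ?hnb]
    case hnb =>
      intro a ha
      rcases List.mem_append.1 ha with ha | ha
      · obtain ⟨v, hv, ha⟩ := List.mem_flatMap.1 ha
        have : key a = v := by simpa using (List.of_mem_filter ha)
        simp only [decide_eq_false_iff_not, not_lt, this]
        exact le_of_lt (hlt1 v hv)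
      · have : key a = key x := by simpa using (List.of_mem_filter ha)
        simp [this]
    rw [insertBy_forall_before _ _ _ ?hfb]
    case hfb =>
      intro b hb
      obtain ⟨v, hv, hb⟩ := List.mem_flatMap.1 hb
      have : key b = v := by simpa using (List.of_mem_filter hb)
      simp only [decide_eq_true_eq, this]
      exact hlt2 v hv
    simp [List.append_assoc]

-- a capped append loop takes at most what is missing to reach length 2
theorem foldl_capped {α β : Type} (p : α → Bool) (f : α → β) (l : List α) (acc : List β) :
    l.foldl (fun out x => if p x && decide (out.length < 2) then out ++ [f x] else out) acc
      = acc ++ ((l.filter p).map f).take (2 - acc.length) := by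
  induction l generalizing acc with
  | nil => simp
  | cons a t ih =>
    by_cases hp : p a
    · by_cases hlen : acc.length < 2
      · simp only [List.foldl_cons, hp, hlen, decide_true, Bool.and_self, if_pos, List.filter_cons,
          List.map_cons]
        rw [ih]
        simp only [List.length_append, List.length_cons, List.length_nil]
        rw [List.append_assoc]
        congr 1
        have h2 : 2 - acc.length = (2 - (acc.length + 1)) + 1 := by omega
        rw [h2, List.take_succ_cons]
        simp
      · simp only [List.foldl_cons, hp, hlen, decide_false, Bool.and_false]
        rw [ih]
        have h0 : 2 - acc.length = 0 := by omega
        simp [h0, hp]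
    · simp only [List.foldl_cons, hp, Bool.false_and]
      rw [ih]
      simp [hp]

-- chunked capped appends over a list of levels = take 2 of the flattened chunks
theorem foldl_take_chunks {γ β : Type} (g : γ → List β) (l : List γ) (acc : List β) :
    l.foldl (fun out v => out ++ (g v).take (2 - out.length)) acc
      = acc ++ (l.flatMap g).take (2 - acc.length) := by
  induction l generalizing acc with
  | nil => simp
  | cons a t ih =>
    simp only [List.foldl_cons, List.flatMap_cons]
    rw [ih, List.append_assoc, List.take_append]
    have harg : 2 - (acc ++ List.take (2 - acc.length) (g a)).length
        = 2 - acc.length - (g a).length := by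
      simp only [List.length_append, List.length_take, Nat.min_def]
      split_ifs <;> omega
    rw [harg]

-- the running (primary, top) fold dominates its start and every score in the list
theorem foldl_best_le (l : List (String × Int)) (st : String × Int) :
    st.2 ≤ (l.foldl (fun st p => if p.2 > st.2 then p else st) st).2
      ∧ ∀ p ∈ l, p.2 ≤ (l.foldl (fun st p => if p.2 > st.2 then p else st) st).2 := by
  induction l generalizing st with
  | nil => simp
  | cons a t ih =>
    simp only [List.foldl_cons]
    by_cases h : a.2 > st.2
    · simp only [if_pos h]
      refine ⟨le_trans (le_of_lt h) (ih a).1, ?_⟩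
      intro p hp
      rcases List.mem_cons.1 hp with rfl | hp
      · exact (ih p).1
      · exact (ih a).2 p hp
    · simp only [if_neg h]
      refine ⟨(ih st).1, ?_⟩
      intro p hp
      rcases List.mem_cons.1 hp with rfl | hp
      · exact le_trans (le_of_not_gt h) (ih st).1
      · exact (ih st).2 p hp

-- range(t, 0, -1) = [t, t-1, …, 1]
theorem pyRange_down (t : Int) (ht : 0 ≤ t) :
    PySem.List.pyRange t 0 (-1) = (List.range t.toNat).map (fun k : Nat => t - (k : Int)) := by
  simp only [PySem.List.pyRange]
  rw [if_neg (by norm_num), if_neg (by norm_num)]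
  rcases lt_or_eq_of_le ht with h | h
  · rw [if_pos h]
    have h2 : ((t - 0 + - -1 - 1) / - -1).toNat = t.toNat := by norm_num
    rw [h2]
    apply List.map_congr_left
    intro k _
    ring
  · simp [← h]

-- the bucket-scan side equals the sort side for ANY score table (abstract core)
set_option maxHeartbeats 1000000 in
theorem core_table (table : List (String × Int)) (pt : String × Int)
    (hpt : table.foldl (fun (st : String × Int) p => if p.2 > st.2 then p else st) ("D9", 0) = pt) :
    (((PySem.List.sorted (table.filter (fun p => p.2 > 0)) (fun x : String × Int => -x.2) false).map
        (·.1)).filter (fun d => d ≠ pt.1)).take 2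
      = (PySem.List.pyRange pt.2 0 (-1)).foldl (fun out lvl =>
          table.foldl (fun out p =>
            if p.2 == lvl && p.1 != pt.1 && decide (out.length < 2) then out ++ [p.1] else out) out) [] := by
  have hbest := foldl_best_le table ("D9", 0)
  rw [hpt] at hbest
  have ht0 : (0 : Int) ≤ pt.2 := hbest.1
  have hle : ∀ p ∈ table, p.2 ≤ pt.2 := hbest.2
  -- B side: collapse the two nested folds into take 2 of a flatMap over the levels
  have hinner : ∀ (lvl : Int) (out : List String),
      table.foldl (fun out p =>
        if p.2 == lvl && p.1 != pt.1 && decide (out.length < 2) then out ++ [p.1] else out) out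
      = out ++ ((table.filter (fun p => p.2 == lvl && p.1 != pt.1)).map (·.1)).take (2 - out.length) :=
    fun lvl out => foldl_capped (fun p => p.2 == lvl && p.1 != pt.1) (·.1) table out
  have houter : (fun (out : List String) (lvl : Int) => table.foldl (fun out p =>
        if p.2 == lvl && p.1 != pt.1 && decide (out.length < 2) then out ++ [p.1] else out) out)
      = (fun (out : List String) (lvl : Int) =>
          out ++ ((table.filter (fun p => p.2 == lvl && p.1 != pt.1)).map (·.1)).take (2 - out.length)) := by
    funext out lvl; exact hinner lvl out
  rw [houter, foldl_take_chunks, pyRange_down pt.2 ht0, List.flatMap_map]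
  -- A side: the stable sort is the concatenation of the score fibers, top level first
  rw [sorted_eq_flatMap_fibers (fun x : String × Int => -x.2)
        ((List.range pt.2.toNat).map (fun k : Nat => -(pt.2 - (k : Int))))
        (by
          rw [List.pairwise_map]
          exact List.pairwise_lt_range.imp (by intro a b hab; omega))
        (table.filter (fun p => p.2 > 0))
        (by
          intro x hx
          have hpos : 0 < x.2 := by
            have := List.of_mem_filter hx
            simpa using this
          have hxle : x.2 ≤ pt.2 := hle x (List.mem_of_mem_filter hx)
          refine List.mem_map.2 ⟨(pt.2 - x.2).toNat, List.mem_range.2 (by omega), by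
            push_cast [Int.toNat_of_nonneg (by omega : (0:Int) ≤ pt.2 - x.2)]; ring⟩)]
  rw [List.flatMap_map, List.map_flatMap, List.filter_flatMap]
  -- both sides are flatMaps over List.range pt.2.toNat; identify them fiberwise
  simp only [List.nil_append, List.length_nil, Nat.sub_zero]
  congr 1
  simp only [List.flatMap]
  congr 1
  apply List.map_congr_left
  intro k hk
  have hk' : (k : Int) < pt.2 := by
    have := List.mem_range.1 hk
    omega
  rw [List.filter_filter, List.filter_map]
  congr 1
  rw [List.filter_filter]
  apply List.filter_congr
  intro p _
  simp only [Function.comp_apply]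
  by_cases h2 : p.2 = pt.2 - (k : Int)
  · by_cases h3 : p.1 = pt.1 <;> simp [h2, h3, hk', bne_iff_ne]
  · have l1 : ((-p.2 : Int) == -(pt.2 - (k : Int))) = false :=
      beq_eq_false_iff_ne.2 (fun hc => h2 (by omega))
    have l2 : (p.2 == pt.2 - (k : Int)) = false := beq_eq_false_iff_ne.2 h2
    rw [l1, l2]
    simp

-- ===== VERDICT (by name: the statement is the Claim_ definition above) =====
set_option maxHeartbeats 1000000 in
theorem infer_secondary_domains_spec : Claim_equal_infer_secondary_domains := by
  intro text _
  simp only [Spec_infer_secondary_domains, infer_secondary_domains, infer_secondary_domains_alt,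
    infer_primary_domain]
  rw [items_foldl_insertIf (fun dh => hintScore (PySem.Str.lower text) dh.2) DOMAIN_HINTS
        PySem.Dict.empty (by intro a _; simp [PySem.Dict.contains_empty]) (by decide)]
  rw [show PySem.Dict.empty.items = ([] : List (String × Int)) from rfl, List.nil_append]
  rw [show (fun dh : String × List String => (dh.1, dh.2.foldl
        (fun acc h => if PySem.Str.isIn h (PySem.Str.lower text) then acc + 1 else acc) (0 : Int)))
      = (fun dh => (dh.1, hintScore (PySem.Str.lower text) dh.2)) from rfl]
  have hprim : DOMAIN_HINTS.foldl (fun (st : String × Int) dh =>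
        if hintScore (PySem.Str.lower text) dh.2 > st.2
        then (dh.1, hintScore (PySem.Str.lower text) dh.2) else st) ("D9", 0)
      = (DOMAIN_HINTS.map (fun dh => (dh.1, hintScore (PySem.Str.lower text) dh.2))).foldl
          (fun (st : String × Int) p => if p.2 > st.2 then p else st) ("D9", 0) := by
    rw [List.foldl_map]
  simp only [hprim]
  apply core_table
  rfl
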